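-- pv_equiv track=rewrite | github.com/HowardOhMyGod/csNetwork | packet.py | chksum
-- ===== SOURCE A (Python) =====
-- def chksum(pkt):
--     def carry_around_add(a, b):
--         c = a + b
--         return (c & 0xffff) + (c >> 16)
--
--     if len(pkt) % 2 != 0:
--         pkt += '\0'
--
--     s = 0
--     for i in range(0, len(pkt), 2):
--         w = (ord(pkt[i]) << 8 ) + ord(pkt[i+1])
--         s = carry_around_add(s, w)
--     return ~s & 0xfff
-- ===== SOURCE B (Python) =====
-- def chksum(pkt):
--     if len(pkt) % 2 != 0:
--         pkt += '\0'
--     s = sum((ord(pkt[i]) << 8) + ord(pkt[i + 1]) for i in range(0, len(pkt), 2))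
--     while s >> 16:
--         s = (s & 0xffff) + (s >> 16)
--     return ~s & 0xfff
-- ===== Notes on version B (the rewrite author's own statement) =====
-- stated objective: faster
-- what changed: B sums all 16-bit words in one plain pass and folds the accumulated carries afterwards with a short while loop, instead of A's per-word carry-around addition through an inner helper function; the final ~s & 0xfff is unchanged.
import Mathlib
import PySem

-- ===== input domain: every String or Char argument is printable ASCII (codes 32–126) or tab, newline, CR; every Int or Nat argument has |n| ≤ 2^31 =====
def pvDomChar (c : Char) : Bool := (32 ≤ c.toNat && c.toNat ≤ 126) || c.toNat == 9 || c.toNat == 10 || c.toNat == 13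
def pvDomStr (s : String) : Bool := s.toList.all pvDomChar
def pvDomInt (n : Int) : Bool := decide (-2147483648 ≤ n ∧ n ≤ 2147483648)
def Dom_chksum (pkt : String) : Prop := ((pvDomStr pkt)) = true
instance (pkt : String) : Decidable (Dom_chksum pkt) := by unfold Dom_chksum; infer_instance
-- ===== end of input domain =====

-- B sums the 16-bit words in one plain pass and folds the carries once at the end, instead of A's per-word carry-around addition (alternative decomposition, same cost).

-- ===== PORT A =====
-- A's inner helper carry_around_add
def pvCaa (a b : Int) : Int :=
  let c := a + b
  PySem.Int.band c 0xffff + (c >>> (16 : Nat))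

def chksum (pkt : String) : Int :=
  let pkt := if PySem.Int.mod (PySem.Str.len pkt) 2 ≠ 0 then pkt ++ "\x00" else pkt
  let s := (PySem.List.pyRange 0 (PySem.Str.len pkt) 2).foldl
    (fun s i =>
      let w := ((PySem.List.pyGetD pkt.toList i '\x00').toNat : Int) <<< (8 : Nat)
               + ((PySem.List.pyGetD pkt.toList (i + 1) '\x00').toNat : Int)
      pvCaa s w) 0
  PySem.Int.band (Int.not s) 0xfff

-- ===== PORT B =====
-- lemmas cited by pvFoldCarry's decreasing_by
theorem pvBand_ffff (s : Int) (hs : 0 ≤ s) : PySem.Int.band s 0xffff = s % 65536 := by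
  rw [PySem.Int.band_of_nonneg hs (by norm_num)]
  have h2 : s.toNat &&& (0xffff : Int).toNat = s.toNat % 65536 := by
    have := Nat.and_two_pow_sub_one_eq_mod s.toNat 16
    norm_num at this ⊢
    exact this
  rw [h2]; omega

theorem pvShift16 (s : Int) : s >>> (16 : Nat) = s / 65536 := by
  simp [Int.shiftRight_eq_div_pow]

-- `while s >> 16:` of Source B; the `0 < _` test is Python's truthiness on the nonnegative s this loop runs on, and makes the recursion total
def pvFoldCarry (s : Int) : Int :=
  if 0 < s >>> (16 : Nat) then
    pvFoldCarry (PySem.Int.band s 0xffff + (s >>> (16 : Nat)))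
  else s
termination_by s.toNat
decreasing_by
  rename_i h
  rw [pvShift16] at h
  have hs : 0 ≤ s := by omega
  rw [pvBand_ffff s hs, pvShift16]
  omega

def chksum_alt (pkt : String) : Int :=
  let pkt := if PySem.Int.mod (PySem.Str.len pkt) 2 ≠ 0 then pkt ++ "\x00" else pkt
  let s := ((PySem.List.pyRange 0 (PySem.Str.len pkt) 2).map
    (fun i => ((PySem.List.pyGetD pkt.toList i '\x00').toNat : Int) <<< (8 : Nat)
              + ((PySem.List.pyGetD pkt.toList (i + 1) '\x00').toNat : Int))).sum
  PySem.Int.band (Int.not (pvFoldCarry s)) 0xfff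

-- ===== PRECONDITION & SPEC =====
def Spec_chksum (pkt : String) (out : Int) : Prop := out = chksum_alt pkt
instance (pkt : String) (out : Int) : Decidable (Spec_chksum pkt out) := by unfold Spec_chksum; infer_instance

-- ===== CLAIM (what is proved, stated in full; the proofs are below) =====
def Claim_equal_chksum : Prop := ∀ (pkt : String), Dom_chksum pkt → Spec_chksum pkt (chksum pkt)

-- ===== LEMMAS AND PROOFS =====

-- the 16-bit words of an (even-length) char list
def pvWords : List Char → List Int
  | a :: b :: t => (((a.toNat : Int) <<< (8 : Nat)) + (b.toNat : Int)) :: pvWords t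
  | _ => []

-- the canonical carry-around (one's-complement) representative of a nonnegative sum
def pvRep (S : Int) : Int := if S = 0 then 0 else (S - 1) % 65535 + 1

-- the padded char list both ports work on
def pvPadded (pkt : String) : List Char :=
  if PySem.Int.mod (PySem.Str.len pkt) 2 ≠ 0 then pkt.toList ++ ['\x00'] else pkt.toList

theorem pvRange_two (n : Nat) :
    PySem.List.pyRange 0 (2 * (n : Int)) 2 = (List.range n).map (fun k : Nat => 2 * (k : Int)) := by
  rw [PySem.List.pyRange_of_pos 0 _ (by norm_num)]
  rcases Nat.eq_zero_or_pos n with h | h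
  · subst h; simp
  · rw [if_pos (by positivity)]
    have hc : ((2 * (n : Int) - 0 + 2 - 1) / 2).toNat = n := by omega
    rw [hc]
    apply List.map_congr_left
    intro k _
    omega

theorem pvMap_range_words (n : Nat) (cs : List Char) (h : cs.length = 2 * n) :
    (List.range n).map (fun k =>
        ((cs.getD (2 * k) '\x00').toNat : Int) <<< (8 : Nat) + ((cs.getD (2 * k + 1) '\x00').toNat : Int))
      = pvWords cs := by
  induction n generalizing cs with
  | zero =>
    have : cs = [] := by
      cases cs with
      | nil => rfl
      | cons a t => simp at h
    subst this; simp [pvWords]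
  | succ n ih =>
    match cs with
    | a :: b :: t =>
      rw [List.range_succ_eq_map, List.map_cons, List.map_map]
      have ht : t.length = 2 * n := by simp at h; omega
      have hstep : ((fun k =>
          ((List.getD (a :: b :: t) (2 * k) '\x00').toNat : Int) <<< (8 : Nat)
            + ((List.getD (a :: b :: t) (2 * k + 1) '\x00').toNat : Int)) ∘ Nat.succ)
          = (fun k =>
          ((t.getD (2 * k) '\x00').toNat : Int) <<< (8 : Nat) + ((t.getD (2 * k + 1) '\x00').toNat : Int)) := by
        funext k
        simp [Function.comp, show 2 * k.succ = 2 * k + 2 by omega]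
      rw [hstep, ih t ht]
      simp [pvWords]
    | [a] => simp at h; omega
    | [] => simp at h

theorem pvCaa_rep (S w : Int) (hS : 0 ≤ S) (hw : 0 ≤ w) (hw' : w ≤ 65534) :
    pvCaa (pvRep S) w = pvRep (S + w) := by
  have h0 : 0 ≤ pvRep S ∧ pvRep S ≤ 65535 := by unfold pvRep; split_ifs <;> omega
  simp only [pvCaa]
  rw [pvBand_ffff _ (by omega), pvShift16]
  unfold pvRep
  split_ifs <;> omega

theorem pvFoldl_caa (L : List Int) (h : ∀ w ∈ L, 0 ≤ w ∧ w ≤ 65534) :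
    ∀ S : Int, 0 ≤ S → L.foldl pvCaa (pvRep S) = pvRep (S + L.sum) := by
  induction L with
  | nil => intro S hS; simp
  | cons w t ih =>
    intro S hS
    obtain ⟨hw, hw'⟩ := h w (by simp)
    have := pvCaa_rep S w hS hw hw'
    simp only [List.foldl_cons, this]
    rw [ih (fun x hx => h x (by simp [hx])) (S + w) (by omega)]
    simp [List.sum_cons]
    ring_nf

theorem pvFoldCarry_rep_aux : ∀ (n : Nat) (S : Int), S.toNat ≤ n → 0 ≤ S → pvFoldCarry S = pvRep S := by
  intro n
  induction n with
  | zero =>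
    intro S h hS
    have : S = 0 := by omega
    subst this
    rw [pvFoldCarry]
    norm_num [pvRep]
  | succ n ih =>
    intro S h hS
    rw [pvFoldCarry]
    split_ifs with hlt
    · rw [pvShift16] at hlt
      rw [pvBand_ffff S hS, pvShift16]
      have hS' : 0 ≤ S % 65536 + S / 65536 := by omega
      have hle : (S % 65536 + S / 65536).toNat ≤ n := by omega
      rw [ih _ hle hS']
      unfold pvRep
      split_ifs <;> omega
    · rw [pvShift16] at hlt
      unfold pvRep
      split_ifs <;> omega

theorem pvFoldCarry_rep (S : Int) (hS : 0 ≤ S) : pvFoldCarry S = pvRep S :=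
  pvFoldCarry_rep_aux S.toNat S le_rfl hS

theorem pvWords_bounds (cs : List Char) (hc : ∀ c ∈ cs, c.toNat ≤ 126) :
    ∀ w ∈ pvWords cs, 0 ≤ w ∧ w ≤ 65534 := by
  induction cs using pvWords.induct with
  | case1 a b t ih =>
    intro w hw
    simp only [pvWords, List.mem_cons] at hw
    rcases hw with hw | hw
    · have ha : a.toNat ≤ 126 := hc a (by simp)
      have hb : b.toNat ≤ 126 := hc b (by simp)
      subst hw
      rw [Int.shiftLeft_eq]
      constructor <;> [positivity; nlinarith [ha, hb]]
    · exact ih (fun c hct => hc c (by simp [hct])) w hw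
  | case2 cs h1 =>
    intro w hw
    cases cs with
    | nil => simp [pvWords] at hw
    | cons a t =>
      cases t with
      | nil => simp [pvWords] at hw
      | cons b t' => exact absurd rfl (h1 a b t')

theorem pvPadded_even (pkt : String) : (pvPadded pkt).length % 2 = 0 := by
  unfold pvPadded
  have hm : PySem.Int.mod (PySem.Str.len pkt) 2 = ((pkt.toList.length : Int)) % 2 := by
    rw [PySem.Int.mod_eq_emod_of_pos (by norm_num), PySem.Str.len_eq]
  split_ifs with h <;> rw [hm] at h
  · simp only [List.length_append, List.length_cons, List.length_nil]
    omega
  · omega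

theorem pvPadded_toList (pkt : String) :
    (if PySem.Int.mod (PySem.Str.len pkt) 2 ≠ 0 then pkt ++ "\x00" else pkt).toList = pvPadded pkt := by
  unfold pvPadded
  split_ifs <;> simp

theorem pvPadded_len (pkt : String) :
    PySem.Str.len (if PySem.Int.mod (PySem.Str.len pkt) 2 ≠ 0 then pkt ++ "\x00" else pkt)
      = ((pvPadded pkt).length : Int) := by
  rw [PySem.Str.len_eq, pvPadded_toList]

theorem pvPadded_dom (pkt : String) (hdom : Dom_chksum pkt) :
    ∀ c ∈ pvPadded pkt, c.toNat ≤ 126 := by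
  intro c hc
  unfold pvPadded at hc
  have hall : ∀ c ∈ pkt.toList, c.toNat ≤ 126 := by
    intro c hc
    have := List.all_eq_true.mp hdom c hc
    simp [pvDomChar] at this
    omega
  split_ifs at hc
  · rcases List.mem_append.mp hc with h | h
    · exact hall c h
    · simp at h; subst h; decide
  · exact hall c hc

-- reduce either port to band (not (pvRep (sum of words))) 0xfff
theorem pvIdx_cast (cs : List Char) (k : Nat) :
    PySem.List.pyGetD cs (2 * (k : Int)) '\x00' = cs.getD (2 * k) '\x00' := by
  rw [show (2 * (k : Int)) = ((2 * k : Nat) : Int) by push_cast; ring, PySem.List.pyGetD_natCast]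

theorem pvIdx_cast' (cs : List Char) (k : Nat) :
    PySem.List.pyGetD cs (2 * (k : Int) + 1) '\x00' = cs.getD (2 * k + 1) '\x00' := by
  rw [show (2 * (k : Int) + 1) = ((2 * k + 1 : Nat) : Int) by push_cast; ring, PySem.List.pyGetD_natCast]

theorem pvFoldl_words (cs : List Char) (n : Nat) (h : cs.length = 2 * n) (i : Int) :
    (List.range n).foldl (fun s k => pvCaa s
        (((cs.getD (2 * k) '\x00').toNat : Int) <<< (8 : Nat) + ((cs.getD (2 * k + 1) '\x00').toNat : Int))) i
      = (pvWords cs).foldl pvCaa i := by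
  rw [← pvMap_range_words n cs h, List.foldl_map]

theorem chksum_eq_rep (pkt : String) (hdom : Dom_chksum pkt) :
    chksum pkt = PySem.Int.band (Int.not (pvRep ((pvWords (pvPadded pkt)).sum))) 0xfff := by
  unfold chksum
  simp only [pvPadded_len, pvPadded_toList]
  rw [show ((pvPadded pkt).length : Int) = 2 * (((pvPadded pkt).length / 2 : Nat) : Int) by
    have := pvPadded_even pkt; push_cast; omega]
  rw [pvRange_two, List.foldl_map]
  simp only [pvIdx_cast, pvIdx_cast']
  rw [pvFoldl_words (pvPadded pkt) ((pvPadded pkt).length / 2) (by have := pvPadded_even pkt; omega)]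
  have hfold := pvFoldl_caa (pvWords (pvPadded pkt)) (pvWords_bounds _ (pvPadded_dom pkt hdom)) 0 le_rfl
  rw [show pvRep 0 = 0 from by norm_num [pvRep], zero_add] at hfold
  rw [hfold]

theorem chksum_alt_eq_rep (pkt : String) (hdom : Dom_chksum pkt) :
    chksum_alt pkt = PySem.Int.band (Int.not (pvRep ((pvWords (pvPadded pkt)).sum))) 0xfff := by
  unfold chksum_alt
  simp only [pvPadded_len, pvPadded_toList]
  rw [show ((pvPadded pkt).length : Int) = 2 * (((pvPadded pkt).length / 2 : Nat) : Int) by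
    have := pvPadded_even pkt; push_cast; omega]
  rw [pvRange_two, List.map_map]
  simp only [Function.comp_def, pvIdx_cast, pvIdx_cast']
  rw [pvMap_range_words ((pvPadded pkt).length / 2) (pvPadded pkt) (by have := pvPadded_even pkt; omega)]
  have hsum : 0 ≤ (pvWords (pvPadded pkt)).sum := by
    apply List.sum_nonneg
    intro w hw
    exact (pvWords_bounds _ (pvPadded_dom pkt hdom) w hw).1
  rw [pvFoldCarry_rep _ hsum]

-- ===== VERDICT (by name: the statement is the Claim_ definition above) =====
theorem chksum_spec : Claim_equal_chksum := by
  intro pkt hdom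
  unfold Spec_chksum
  rw [chksum_eq_rep pkt hdom, chksum_alt_eq_rep pkt hdom]
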